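-- pv_equiv track=rewrite | github.com/Ai-Assistant-Markus/openai-auth-switcher | openai_auth_switcher.py | resolve_account_key
-- ===== SOURCE A (Python) =====
-- from typing import Any
--
-- def account_aliases(account: dict[str, Any], canonical: str) -> list[str]:
--     aliases = account.get("aliases") if isinstance(account.get("aliases"), list) else []
--     values = [canonical.strip().lower()]
--     for alias in aliases:
--         alias_value = str(alias).strip().lower()
--         if alias_value and alias_value not in values:
--             values.append(alias_value)
--     return values
--
-- def resolve_account_key(accounts: dict[str, Any], email: str) -> str:
--     lookup = str(email or "").strip().lower()
--     for canonical, account in accounts.items():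
--         if not isinstance(account, dict):
--             continue
--         if lookup in account_aliases(account, canonical):
--             return canonical
--     return ""
-- ===== SOURCE B (Python) =====
-- def resolve_account_key(accounts, email):
--     # Build one normalized-value -> canonical-key index (first occurrence wins),
--     # then answer with a single dict lookup.
--     index = {}
--     for canonical, account in accounts.items():
--         if not isinstance(account, dict):
--             continue
--         ck = canonical.strip().lower()
--         if ck not in index:
--             index[ck] = canonical
--         aliases = account.get("aliases")
--         if not isinstance(aliases, list):
--             aliases = []
--         for alias in aliases:
--             av = str(alias).strip().lower()
--             if av and av not in index:
--                 index[av] = canonical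
--     return index.get(str(email or "").strip().lower(), "")
-- ===== Notes on version B (the rewrite author's own statement) =====
-- stated objective: idiomatic
-- what changed: Instead of rescanning each account's alias list for a match with early return, B builds one normalized-value->canonical dict index (first occurrence wins) and answers with a single dict lookup.
import Mathlib
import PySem

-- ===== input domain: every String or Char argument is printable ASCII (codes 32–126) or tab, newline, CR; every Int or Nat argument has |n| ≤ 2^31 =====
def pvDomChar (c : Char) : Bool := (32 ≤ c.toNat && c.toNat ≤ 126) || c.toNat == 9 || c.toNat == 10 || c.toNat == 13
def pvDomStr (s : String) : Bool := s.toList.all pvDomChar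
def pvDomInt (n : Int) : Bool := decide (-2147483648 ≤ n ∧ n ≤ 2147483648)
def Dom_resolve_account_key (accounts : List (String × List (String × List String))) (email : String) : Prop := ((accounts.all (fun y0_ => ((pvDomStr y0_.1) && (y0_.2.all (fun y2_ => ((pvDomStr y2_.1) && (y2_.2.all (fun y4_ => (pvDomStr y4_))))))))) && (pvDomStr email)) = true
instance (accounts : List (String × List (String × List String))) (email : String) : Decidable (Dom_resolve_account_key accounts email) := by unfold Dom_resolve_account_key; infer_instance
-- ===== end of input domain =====

-- B replaces A's per-account alias-list rescan (early-return linear scan) by one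
-- normalized-value -> canonical dict index built in a single pass, answered by one lookup (idiomatic).

-- x.strip().lower()
def pvNorm (s : String) : String := PySem.Str.lower (PySem.Str.strip s)

-- ===== PORT A =====
-- account.get("aliases") if it is a list else []  (under the stated type it is always a list when present)
def account_aliases (account : List (String × List String)) (canonical : String) : List String :=
  let aliases := ((PySem.Dict.mk account).get? "aliases").getD []
  let values := [pvNorm canonical]
  aliases.foldl (fun values al =>
    let alias_value := pvNorm al
    if alias_value ≠ "" ∧ alias_value ∉ values then values ++ [alias_value] else values) values

-- the for-loop with early return
def pvLoopA : List (String × List (String × List String)) → String → String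
  | [], _ => ""
  | (canonical, account) :: rest, lookup =>
      -- isinstance(account, dict) is always true under the stated type
      if lookup ∈ account_aliases account canonical then canonical else pvLoopA rest lookup

def resolve_account_key (accounts : List (String × List (String × List String))) (email : String) : String :=
  -- str(email or "").strip().lower(): for a string argument this is email.strip().lower()
  pvLoopA accounts (pvNorm email)

-- ===== PORT B =====
-- one iteration of B's outer loop: add the account's normalized canonical and aliases to the index
def pvAddAccount (d : PySem.Dict String String) (p : String × List (String × List String)) :
    PySem.Dict String String :=
  match p with
  | (canonical, account) =>
    let ck := pvNorm canonical
    let d := if d.contains ck = false then d.insert ck canonical else d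
    let aliases := ((PySem.Dict.mk account).get? "aliases").getD []
    aliases.foldl (fun d al =>
      let av := pvNorm al
      if av ≠ "" ∧ d.contains av = false then d.insert av canonical else d) d

def resolve_account_key_alt (accounts : List (String × List (String × List String))) (email : String) : String :=
  (accounts.foldl pvAddAccount PySem.Dict.empty).getD (pvNorm email) ""

-- ===== PRECONDITION & SPEC =====
def Spec_resolve_account_key (accounts : List (String × List (String × List String))) (email : String) (out : String) : Prop := out = resolve_account_key_alt accounts email
instance (accounts : List (String × List (String × List String))) (email : String) (out : String) : Decidable (Spec_resolve_account_key accounts email out) := by unfold Spec_resolve_account_key; infer_instance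

-- ===== CLAIM (what is proved, stated in full; the proofs are below) =====
def Claim_equal_resolve_account_key : Prop := ∀ (accounts : List (String × List (String × List String))) (email : String), Dom_resolve_account_key accounts email → Spec_resolve_account_key accounts email (resolve_account_key accounts email)

-- ===== LEMMAS AND PROOFS =====

-- the first canonical key (in order) whose value set contains k, as an Option
def pvFirst : List (String × List (String × List String)) → String → Option String
  | [], _ => none
  | (c, acc) :: rest, k =>
      if k ∈ account_aliases acc c then some c else pvFirst rest k

theorem pvLoopA_eq_first (accounts : List (String × List (String × List String))) (k : String) :
    pvLoopA accounts k = (pvFirst accounts k).getD "" := by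
  induction accounts with
  | nil => rfl
  | cons p rest ih =>
    obtain ⟨c, acc⟩ := p
    simp only [pvLoopA, pvFirst]
    split <;> simp [ih]

theorem pvDict_get?_none_of_not_contains {d : PySem.Dict String String} {k : String}
    (h : d.contains k = false) : d.get? k = none := by
  have hc := PySem.Dict.contains_eq_isSome_get? (d := d) (k := k)
  rw [h] at hc
  exact Option.not_isSome_iff_eq_none.1 (by simp [← hc])

theorem pvDict_contains_true_of_get?_ne_none {d : PySem.Dict String String} {k : String}
    (h : d.contains k ≠ false) : d.contains k = true := by
  cases hb : d.contains k
  · exact absurd hb h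
  · rfl

theorem mem_values_fold (as : List String) (values : List String) (k : String) :
    k ∈ as.foldl (fun values al =>
        let alias_value := pvNorm al
        if alias_value ≠ "" ∧ alias_value ∉ values then values ++ [alias_value] else values) values ↔
      k ∈ values ∨ (k ≠ "" ∧ ∃ a ∈ as, pvNorm a = k) := by
  induction as generalizing values with
  | nil => simp
  | cons a rest ih =>
    simp only [List.foldl_cons]
    by_cases h : pvNorm a ≠ "" ∧ pvNorm a ∉ values
    · rw [if_pos h, ih]
      constructor
      · rintro (hv | ⟨hne, x, hx, hxk⟩)
        · rcases List.mem_append.1 hv with hv | hv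
          · exact Or.inl hv
          · have hk : k = pvNorm a := by simpa using hv
            exact Or.inr ⟨by rw [hk]; exact h.1, a, List.mem_cons_self, hk.symm⟩
        · exact Or.inr ⟨hne, x, List.mem_cons_of_mem _ hx, hxk⟩
      · rintro (hv | ⟨hne, x, hx, hxk⟩)
        · exact Or.inl (List.mem_append_left _ hv)
        · rcases List.mem_cons.1 hx with rfl | hx
          · exact Or.inl (List.mem_append_right _ (by simp [hxk.symm]))
          · exact Or.inr ⟨hne, x, hx, hxk⟩
    · rw [if_neg h, ih]
      constructor
      · rintro (hv | ⟨hne, x, hx, hxk⟩)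
        · exact Or.inl hv
        · exact Or.inr ⟨hne, x, List.mem_cons_of_mem _ hx, hxk⟩
      · rintro (hv | ⟨hne, x, hx, hxk⟩)
        · exact Or.inl hv
        · rcases List.mem_cons.1 hx with rfl | hx
          · rcases not_and_or.1 h with h1 | h1
            · exact absurd (by rw [hxk]; exact hne) h1
            · exact Or.inl (hxk ▸ not_not.1 h1)
          · exact Or.inr ⟨hne, x, hx, hxk⟩

theorem mem_account_aliases (acc : List (String × List String)) (c : String) (k : String) :
    k ∈ account_aliases acc c ↔
      k = pvNorm c ∨ (k ≠ "" ∧ ∃ a ∈ ((PySem.Dict.mk acc).get? "aliases").getD [], pvNorm a = k) := by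
  simp only [account_aliases, mem_values_fold, List.mem_singleton]

theorem get?_alias_fold (as : List String) (d : PySem.Dict String String) (c k : String) :
    (as.foldl (fun d al =>
        let av := pvNorm al
        if av ≠ "" ∧ d.contains av = false then d.insert av c else d) d).get? k =
      match d.get? k with
      | some v => some v
      | none => if k ≠ "" ∧ ∃ a ∈ as, pvNorm a = k then some c else none := by
  induction as generalizing d with
  | nil => cases h : d.get? k <;> simp [h]
  | cons a rest ih =>
    simp only [List.foldl_cons]
    by_cases hg : pvNorm a ≠ "" ∧ d.contains (pvNorm a) = false
    · rw [if_pos hg, ih, PySem.Dict.get?_insert]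
      by_cases hk : k = pvNorm a
      · rw [if_pos hk]
        have hdk : d.get? k = none := by
          rw [hk]; exact pvDict_get?_none_of_not_contains hg.2
        rw [hdk]
        have hcond : k ≠ "" ∧ ∃ x ∈ a :: rest, pvNorm x = k :=
          ⟨by rw [hk]; exact hg.1, a, List.mem_cons_self, hk.symm⟩
        rw [if_pos hcond]
      · rw [if_neg hk]
        cases h : d.get? k with
        | some v => simp
        | none =>
          have hcond : (k ≠ "" ∧ ∃ x ∈ rest, pvNorm x = k) ↔ (k ≠ "" ∧ ∃ x ∈ a :: rest, pvNorm x = k) := by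
            constructor
            · rintro ⟨hne, x, hx, hxk⟩
              exact ⟨hne, x, List.mem_cons_of_mem _ hx, hxk⟩
            · rintro ⟨hne, x, hx, hxk⟩
              rcases List.mem_cons.1 hx with rfl | hx
              · exact absurd hxk.symm hk
              · exact ⟨hne, x, hx, hxk⟩
          simp only [hcond]
    · rw [if_neg hg, ih]
      cases h : d.get? k with
      | some v => simp
      | none =>
        have hcond : (k ≠ "" ∧ ∃ x ∈ rest, pvNorm x = k) ↔ (k ≠ "" ∧ ∃ x ∈ a :: rest, pvNorm x = k) := by
          constructor
          · rintro ⟨hne, x, hx, hxk⟩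
            exact ⟨hne, x, List.mem_cons_of_mem _ hx, hxk⟩
          · rintro ⟨hne, x, hx, hxk⟩
            rcases List.mem_cons.1 hx with rfl | hx
            · -- pvNorm x = k, guard failed: x already indexed, but then d.get? k ≠ none
              rcases not_and_or.1 hg with h1 | h1
              · exact absurd (by rw [hxk]; exact hne) h1
              · have hct := pvDict_contains_true_of_get?_ne_none h1
                have := pvDict_get?_none_of_not_contains (d := d) (k := pvNorm x)
                have hs := PySem.Dict.contains_eq_isSome_get? (d := d) (k := pvNorm x)
                rw [hct, hxk, h] at hs
                simp at hs
            · exact ⟨hne, x, hx, hxk⟩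
        simp only [hcond]

theorem get?_addAccount (d : PySem.Dict String String) (c : String)
    (acc : List (String × List String)) (k : String) :
    (pvAddAccount d (c, acc)).get? k =
      match d.get? k with
      | some v => some v
      | none => if k ∈ account_aliases acc c then some c else none := by
  simp only [pvAddAccount]
  rw [get?_alias_fold]
  by_cases hck : d.contains (pvNorm c) = false
  · rw [if_pos hck, PySem.Dict.get?_insert]
    by_cases hk : k = pvNorm c
    · rw [if_pos hk]
      have hdk : d.get? k = none := by
        rw [hk]; exact pvDict_get?_none_of_not_contains hck
      rw [hdk]
      rw [if_pos ((mem_account_aliases acc c k).2 (Or.inl hk))]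
    · rw [if_neg hk]
      cases h : d.get? k with
      | some v => simp
      | none =>
        by_cases hm : k ∈ account_aliases acc c
        · rw [if_pos hm]
          rcases (mem_account_aliases acc c k).1 hm with h' | h'
          · exact absurd h' hk
          · rw [if_pos h']
        · rw [if_neg (fun hp => hm ((mem_account_aliases acc c k).2 (Or.inr hp))), if_neg hm]
  · rw [if_neg hck]
    cases h : d.get? k with
    | some v => simp
    | none =>
      have hk : k ≠ pvNorm c := by
        intro hkc
        have hct := pvDict_contains_true_of_get?_ne_none hck
        have hs := PySem.Dict.contains_eq_isSome_get? (d := d) (k := pvNorm c)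
        rw [hct, ← hkc, h] at hs
        simp at hs
      by_cases hm : k ∈ account_aliases acc c
      · rw [if_pos hm]
        rcases (mem_account_aliases acc c k).1 hm with h' | h'
        · exact absurd h' hk
        · rw [if_pos h']
      · rw [if_neg (fun hp => hm ((mem_account_aliases acc c k).2 (Or.inr hp))), if_neg hm]

theorem get?_fold_accounts (accounts : List (String × List (String × List String)))
    (d : PySem.Dict String String) (k : String) :
    (accounts.foldl pvAddAccount d).get? k =
      match d.get? k with
      | some v => some v
      | none => pvFirst accounts k := by
  induction accounts generalizing d with
  | nil => cases h : d.get? k <;> simp [h, pvFirst]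
  | cons p rest ih =>
    obtain ⟨c, acc⟩ := p
    simp only [List.foldl_cons, pvFirst]
    rw [ih, get?_addAccount]
    cases h : d.get? k with
    | some v => simp
    | none => split_ifs <;> simp

-- ===== VERDICT (by name: the statement is the Claim_ definition above) =====
theorem resolve_account_key_spec : Claim_equal_resolve_account_key := by
  intro accounts email _
  show resolve_account_key accounts email = resolve_account_key_alt accounts email
  rw [resolve_account_key, resolve_account_key_alt, pvLoopA_eq_first,
    PySem.Dict.getD_eq_get?_getD, get?_fold_accounts]
  simp [PySem.Dict.get?_empty]
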